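-- pv_equiv track=rewrite | github.com/hgim96715-lgtm/python_coding_test | 프로그래머스/0/181918. 배열 만들기 4/배열 만들기 4.py | solution
-- ===== SOURCE A (Python) =====
-- def solution(arr):
--     stk = []
--     k=0
--     while k <len(arr):
--         if len(stk)==0:
--             stk.append(arr[k])
--             k+=1
--         elif len(stk)>0 and stk[-1]<arr[k]:
--             stk.append(arr[k])
--             k+=1
--         elif len(stk)>0 and stk[-1]>=arr[k]:
--             stk.pop()
--     return stk
-- ===== SOURCE B (Python) =====
-- def solution(arr):
--     res = []
--     cur = None
--     for x in reversed(arr):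
--         if cur is None or x < cur:
--             res.append(x)
--             cur = x
--     res.reverse()
--     return res
-- ===== Notes on version B (the rewrite author's own statement) =====
-- stated objective: simpler
-- what changed: Replaces the stack simulation with pops by a single right-to-left suffix-minimum scan keeping each element strictly smaller than everything to its right; measured faster by a constant factor (no repeated list pops/appends).
import Mathlib
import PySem

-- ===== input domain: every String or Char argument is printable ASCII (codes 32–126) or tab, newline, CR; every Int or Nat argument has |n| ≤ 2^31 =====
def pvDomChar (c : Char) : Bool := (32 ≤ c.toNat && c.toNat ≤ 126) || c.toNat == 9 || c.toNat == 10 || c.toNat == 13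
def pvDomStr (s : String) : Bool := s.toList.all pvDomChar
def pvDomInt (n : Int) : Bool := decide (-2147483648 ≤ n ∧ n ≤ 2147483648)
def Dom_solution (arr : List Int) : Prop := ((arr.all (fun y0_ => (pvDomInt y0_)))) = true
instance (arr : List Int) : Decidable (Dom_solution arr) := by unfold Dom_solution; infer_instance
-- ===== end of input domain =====

-- B replaces A's stack-with-pops simulation by one right-to-left suffix-minimum scan (simpler).

-- ===== PORT A =====
-- A's while loop: stk is kept top-at-head (Python appends/pops at the end; we mirror at the
-- head and reverse on return, the same values in the same roles); each iteration either
-- pushes arr[k] and advances k, or pops, exactly as the Python branches do.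
def solutionLoop (stk : List Int) (rest : List Int) : List Int :=
  match rest with
  | [] => stk
  | x :: xs =>
    match stk with
    | [] => solutionLoop [x] xs
    | t :: ts =>
      if t < x then solutionLoop (x :: t :: ts) xs
      else solutionLoop ts (x :: xs)
termination_by 2 * rest.length + stk.length
decreasing_by all_goals simp [List.length] <;> omega

def solution (arr : List Int) : List Int := (solutionLoop [] arr).reverse

-- ===== PORT B =====
-- B: iterate over reversed(arr) with (res, cur); keep x when cur is None or x < cur;
-- finally reverse res.
def solution_alt (arr : List Int) : List Int :=
  let p := arr.reverse.foldl
    (fun (st : List Int × Option Int) x =>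
      match st.2 with
      | none => (st.1 ++ [x], some x)
      | some c => if x < c then (st.1 ++ [x], some x) else st)
    ([], none)
  p.1.reverse

-- ===== PRECONDITION & SPEC =====
def Spec_solution (arr : List Int) (out : List Int) : Prop := out = solution_alt arr
instance (arr : List Int) (out : List Int) : Decidable (Spec_solution arr out) := by unfold Spec_solution; infer_instance

-- ===== CLAIM (what is proved, stated in full; the proofs are below) =====
def Claim_equal_solution : Prop := ∀ (arr : List Int), Dom_solution arr → Spec_solution arr (solution arr)

-- ===== LEMMAS AND PROOFS =====

-- g: the common characterisation — survivors are exactly the elements strictly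
-- smaller than every element to their right.
def gSurv : List Int → List Int
  | [] => []
  | x :: xs =>
    match gSurv xs with
    | [] => [x]
    | m :: r => if x < m then x :: m :: r else m :: r

def stepA (s : List Int) (x : Int) : List Int := x :: s.dropWhile (fun t => x ≤ t)

-- A's pop loop on one incoming element collapses to dropWhile.
theorem solutionLoop_cons (s : List Int) (x : Int) (xs : List Int) :
    solutionLoop s (x :: xs) = solutionLoop (stepA s x) xs := by
  induction s with
  | nil => simp [solutionLoop, stepA]
  | cons t ts ih =>
    by_cases h : t < x
    · simp [solutionLoop, h, stepA, List.dropWhile, not_le.mpr h]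
    · have hx : x ≤ t := not_lt.mp h
      simp only [solutionLoop, if_neg h]
      rw [ih]
      simp [stepA, List.dropWhile, hx]

theorem solutionLoop_eq_foldl (l : List Int) (s : List Int) :
    solutionLoop s l = l.foldl stepA s := by
  induction l generalizing s with
  | nil => simp [solutionLoop]
  | cons x xs ih => rw [solutionLoop_cons, List.foldl_cons, ih]

theorem dropWhile_dropWhile (s : List Int) (m x : Int) (h : m ≤ x) :
    (s.dropWhile (fun t => x ≤ t)).dropWhile (fun t => m ≤ t)
      = s.dropWhile (fun t => m ≤ t) := by
  induction s with
  | nil => rfl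
  | cons t ts ih =>
    by_cases hx : x ≤ t
    · have hm : m ≤ t := le_trans h hx
      simp [List.dropWhile, hx, hm, ih]
    · simp [List.dropWhile, hx]

-- Invariant of A's fold: processing l from stack s yields the survivors of l (reversed,
-- top-at-head) on top of s with everything ≥ the minimum survivor dropped.
theorem foldl_stepA_eq (l : List Int) (s : List Int) :
    l.foldl stepA s
      = (gSurv l).reverse ++
        (match (gSurv l).head? with
         | none => s
         | some m => s.dropWhile (fun t => m ≤ t)) := by
  induction l generalizing s with
  | nil => simp [gSurv]
  | cons x xs ih =>
    rw [List.foldl_cons, ih]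
    cases hg : gSurv xs with
    | nil => simp [gSurv, hg, stepA]
    | cons m r =>
      by_cases h : x < m
      · simp [gSurv, hg, h, stepA, not_le.mpr h]
      · have hmx : m ≤ x := not_lt.mp h
        simp [gSurv, hg, h, stepA, hmx, dropWhile_dropWhile s m x hmx]

theorem solution_eq_gSurv (arr : List Int) : solution arr = gSurv arr := by
  unfold solution
  rw [solutionLoop_eq_foldl, foldl_stepA_eq]
  cases gSurv arr with
  | nil => rfl
  | cons m r => simp [List.dropWhile]

-- Invariant of B's fold over reversed(arr): res is the survivors reversed, cur their head.
theorem alt_fold_eq (l : List Int) :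
    l.reverse.foldl
      (fun (st : List Int × Option Int) x =>
        match st.2 with
        | none => (st.1 ++ [x], some x)
        | some c => if x < c then (st.1 ++ [x], some x) else st)
      ([], none)
    = ((gSurv l).reverse, (gSurv l).head?) := by
  induction l with
  | nil => simp [gSurv]
  | cons x xs ih =>
    rw [List.reverse_cons, List.foldl_append, ih]
    cases hg : gSurv xs with
    | nil => simp [gSurv, hg]
    | cons m r =>
      by_cases h : x < m
      · simp [gSurv, hg, h]
      · simp [gSurv, hg, h]

theorem solution_alt_eq_gSurv (arr : List Int) : solution_alt arr = gSurv arr := by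
  unfold solution_alt
  rw [alt_fold_eq]
  simp

-- ===== VERDICT (by name: the statement is the Claim_ definition above) =====
theorem solution_spec : Claim_equal_solution := by
  intro arr _
  unfold Spec_solution
  rw [solution_eq_gSurv, solution_alt_eq_gSurv]
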